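-- pv_equiv track=rewrite | github.com/noghte/omim-kinase | kinsnps_allinfo.py | get_amino_acid_at_position
-- ===== SOURCE A (Python) =====
-- def get_amino_acid_at_position(sequence: str, full_sequence_pos: int) -> str:
--     """Get the amino acid at a specific position in the sequence."""
--     current_count = 0
--     for c in sequence:
--         if c not in '() -':
--             current_count += 1
--             if current_count == full_sequence_pos:
--                 return c
--     return None  # Position not found
-- ===== SOURCE B (Python) =====
-- def get_amino_acid_at_position(sequence: str, full_sequence_pos: int) -> str:
--     """Get the amino acid at a specific position in the sequence."""
--     cleaned = [c for c in sequence if c not in '() -']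
--     if 1 <= full_sequence_pos <= len(cleaned):
--         return cleaned[full_sequence_pos - 1]
--     return None  # Position not found
-- ===== Notes on version B (the rewrite author's own statement) =====
-- stated objective: simpler
-- what changed: Replaced the fused scan with a running counter and early return by two phases: filter out '() -' characters into a list, then a guarded direct index at position-1.
import Mathlib
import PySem

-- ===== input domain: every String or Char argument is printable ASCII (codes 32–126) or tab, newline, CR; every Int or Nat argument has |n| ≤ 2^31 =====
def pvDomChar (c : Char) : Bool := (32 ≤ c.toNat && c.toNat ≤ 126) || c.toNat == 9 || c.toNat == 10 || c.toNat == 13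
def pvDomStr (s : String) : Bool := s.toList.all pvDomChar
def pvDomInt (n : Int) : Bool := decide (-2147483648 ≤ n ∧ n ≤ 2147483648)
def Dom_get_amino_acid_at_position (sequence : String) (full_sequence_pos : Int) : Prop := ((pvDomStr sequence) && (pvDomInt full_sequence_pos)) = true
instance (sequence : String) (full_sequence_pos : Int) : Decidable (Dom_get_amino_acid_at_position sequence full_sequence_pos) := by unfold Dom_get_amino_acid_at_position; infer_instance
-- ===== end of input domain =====

-- B separates A's fused counting scan into two phases: filter the special characters out, then one guarded index (same return values).


-- ===== PORT A =====
-- 'c not in "() -"' (Python char membership in a 4-char string)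
def pvNotSpecial (c : Char) : Bool := !(c = '(' || c = ')' || c = ' ' || c = '-')

-- the for-loop of A: counter state, early return
def pvScanA : List Char → Int → Int → Option String
  | [], _, _ => none
  | c :: rest, pos, cnt =>
    if pvNotSpecial c then
      if cnt + 1 = pos then some (String.mk [c]) else pvScanA rest pos (cnt + 1)
    else pvScanA rest pos cnt

def get_amino_acid_at_position (sequence : String) (full_sequence_pos : Int) : Option String :=
  pvScanA sequence.toList full_sequence_pos 0

-- ===== PORT B =====
def get_amino_acid_at_position_alt (sequence : String) (full_sequence_pos : Int) : Option String :=
  let cleaned := sequence.toList.filter pvNotSpecial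
  if 1 ≤ full_sequence_pos ∧ full_sequence_pos ≤ (cleaned.length : Int) then
    (cleaned[(full_sequence_pos - 1).toNat]?).map (fun c => String.mk [c])
  else none

-- ===== PRECONDITION & SPEC =====
def Spec_get_amino_acid_at_position (sequence : String) (full_sequence_pos : Int) (out : Option String) : Prop := out = get_amino_acid_at_position_alt sequence full_sequence_pos
instance (sequence : String) (full_sequence_pos : Int) (out : Option String) : Decidable (Spec_get_amino_acid_at_position sequence full_sequence_pos out) := by unfold Spec_get_amino_acid_at_position; infer_instance

-- ===== CLAIM (what is proved, stated in full; the proofs are below) =====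
def Claim_equal_get_amino_acid_at_position : Prop := ∀ (sequence : String) (full_sequence_pos : Int), Dom_get_amino_acid_at_position sequence full_sequence_pos → Spec_get_amino_acid_at_position sequence full_sequence_pos (get_amino_acid_at_position sequence full_sequence_pos)

-- ===== LEMMAS AND PROOFS =====
-- A's scan, started with counter cnt, returns the (pos - cnt)-th kept character (1-based), if any.
theorem pvScanA_eq (l : List Char) : ∀ (pos cnt : Int),
    pvScanA l pos cnt =
      if 1 ≤ pos - cnt then
        ((l.filter pvNotSpecial)[(pos - cnt - 1).toNat]?).map (fun c => String.mk [c])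
      else none := by
  induction l with
  | nil => intro pos cnt; simp [pvScanA]
  | cons c rest ih =>
    intro pos cnt
    by_cases hc : pvNotSpecial c
    · simp only [pvScanA, hc, if_true, List.filter_cons_of_pos hc]
      by_cases heq : cnt + 1 = pos
      · have h1 : (1:Int) ≤ pos - cnt := by omega
        have h0 : (pos - cnt - 1).toNat = 0 := by omega
        simp [heq, h1, h0]
      · rw [if_neg heq, ih]
        by_cases h1 : (1:Int) ≤ pos - (cnt + 1)
        · have h1' : (1:Int) ≤ pos - cnt := by omega
          have hn : (pos - cnt - 1).toNat = (pos - (cnt + 1) - 1).toNat + 1 := by omega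
          simp [h1, h1', hn]
        · have h2 : ¬ (1:Int) ≤ pos - cnt ∨ pos - cnt = 1 := by omega
          rcases h2 with h2 | h2
          · simp [h1, h2]
          · omega
    · simp only [pvScanA, hc, List.filter_cons_of_neg hc]
      exact ih pos cnt

-- ===== VERDICT (by name: the statement is the Claim_ definition above) =====
theorem get_amino_acid_at_position_spec : Claim_equal_get_amino_acid_at_position := by
  intro sequence pos _
  show _ = _
  rw [get_amino_acid_at_position, get_amino_acid_at_position_alt, pvScanA_eq]
  set f := sequence.toList.filter pvNotSpecial with hf
  by_cases h1 : (1:Int) ≤ pos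
  · by_cases h2 : pos ≤ (f.length : Int)
    · simp [h1, h2]
    · simp [h1, h2]
      omega
  · simp [h1]
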